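-- pv_equiv track=rewrite | github.com/seisdedosdiego/LEPL1401 | session 4/Carre.py | carre
-- ===== SOURCE A (Python) =====
-- def carre(n):
--     """ Cette fonction retourne un matrice 'spéciale'.
--         pré: n un nombre entier donné
--         post: retourne une matrice 'spéciale'
--     """
--     my_matrice = []
--     for i in range(n):
--         row = []
--         for j in range(n):
--             row.append(j+i*n)
--         my_matrice.append(row)
--     return my_matrice
-- ===== SOURCE B (Python) =====
-- def carre(n):
--     size = max(n, 0)
--     flat = list(range(size * size))
--     return [flat[i * size:(i + 1) * size] for i in range(size)]
-- ===== Notes on version B (the rewrite author's own statement) =====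
-- stated objective: simpler
-- what changed: B builds the flat row-major sequence once with range(n*n) and reshapes it into rows by slicing contiguous chunks, instead of computing each cell j+i*n in nested loops.
import Mathlib
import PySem

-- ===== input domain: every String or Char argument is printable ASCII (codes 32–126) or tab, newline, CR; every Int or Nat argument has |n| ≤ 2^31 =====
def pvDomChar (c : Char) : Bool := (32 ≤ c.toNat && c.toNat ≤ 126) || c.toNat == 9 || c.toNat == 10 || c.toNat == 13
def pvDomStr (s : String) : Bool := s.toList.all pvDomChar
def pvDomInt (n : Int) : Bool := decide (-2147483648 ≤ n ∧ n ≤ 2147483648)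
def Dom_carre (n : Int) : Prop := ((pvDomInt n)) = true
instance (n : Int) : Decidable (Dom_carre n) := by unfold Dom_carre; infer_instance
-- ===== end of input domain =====

-- B replaces A's nested per-cell loops by one flat range(n*n) reshaped into rows via slicing (objective: simpler).

-- ===== PORT A =====
def carre (n : Int) : List (List Int) :=
  (PySem.List.pyRange 0 n 1).foldl
    (fun my_matrice i =>
      my_matrice ++ [(PySem.List.pyRange 0 n 1).foldl (fun row j => row ++ [j + i * n]) []])
    []

-- ===== PORT B =====
def carre_alt (n : Int) : List (List Int) :=
  let size := max n 0
  let flat := PySem.List.pyRange 0 (size * size) 1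
  (PySem.List.pyRange 0 size 1).map
    (fun i => PySem.List.slice flat (some (i * size)) (some ((i + 1) * size)))

-- ===== PRECONDITION & SPEC =====
def Spec_carre (n : Int) (out : List (List Int)) : Prop := out = carre_alt n
instance (n : Int) (out : List (List Int)) : Decidable (Spec_carre n out) := by unfold Spec_carre; infer_instance

-- ===== CLAIM (what is proved, stated in full; the proofs are below) =====
def Claim_equal_carre : Prop := ∀ (n : Int), Dom_carre n → Spec_carre n (carre n)

-- ===== LEMMAS AND PROOFS =====

theorem foldl_append_singleton {α β : Type} (f : α → β) (l : List α) (init : List β) :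
    l.foldl (fun acc x => acc ++ [f x]) init = init ++ l.map f := by
  induction l generalizing init with
  | nil => simp
  | cons x xs ih => simp [List.foldl, ih]

theorem carre_row (n i : Int) (h0 : 0 ≤ i) (h1 : i < n) :
    PySem.List.slice (PySem.List.pyRange 0 (n * n) 1) (some (i * n)) (some ((i + 1) * n)) =
      (PySem.List.pyRange 0 n 1).map (fun j => j + i * n) := by
  have hn : 0 < n := lt_of_le_of_lt h0 h1
  have ha : 0 ≤ i * n := mul_nonneg h0 (le_of_lt hn)
  have hb : 0 ≤ (i + 1) * n := mul_nonneg (by omega) (le_of_lt hn)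
  rw [PySem.List.slice_toNat _ ha hb]
  have hsplit1 : PySem.List.pyRange 0 (n * n) 1 =
      PySem.List.pyRange 0 (i * n) 1 ++ PySem.List.pyRange (i * n) (n * n) 1 :=
    PySem.List.pyRange_one_append 0 (i * n) (n * n) ha (by nlinarith)
  have hsplit2 : PySem.List.pyRange (i * n) (n * n) 1 =
      PySem.List.pyRange (i * n) ((i + 1) * n) 1 ++ PySem.List.pyRange ((i + 1) * n) (n * n) 1 :=
    PySem.List.pyRange_one_append (i * n) ((i + 1) * n) (n * n) (by nlinarith) (by nlinarith)
  have hd : (PySem.List.pyRange 0 (i * n) 1).length = (i * n).toNat := by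
    rw [PySem.List.length_pyRange_one]; omega
  have ht : (PySem.List.pyRange (i * n) ((i + 1) * n) 1).length =
      ((i + 1) * n).toNat - (i * n).toNat := by
    rw [PySem.List.length_pyRange_one]
    omega
  rw [hsplit1, List.drop_left' hd, hsplit2, List.take_left' ht,
    PySem.List.pyRange_one, PySem.List.pyRange_one]
  have hcongr : ((i + 1) * n - i * n).toNat = (n - 0).toNat := by
    have : ((i + 1) * n - i * n) = n := by ring
    rw [this]; omega
  rw [hcongr, List.map_map]
  apply List.map_congr_left
  intro k _
  simp; ring

-- ===== VERDICT (by name: the statement is the Claim_ definition above) =====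
theorem carre_spec : Claim_equal_carre := by
  intro n _
  unfold Spec_carre carre carre_alt
  by_cases h : n ≤ 0
  · simp only [PySem.List.pyRange_one_eq_nil h,
      PySem.List.pyRange_one_eq_nil (show max n 0 ≤ (0 : Int) by omega)]
    simp
  · have hmax : max n 0 = n := by omega
    simp only [hmax]
    rw [foldl_append_singleton
      (fun i => (PySem.List.pyRange 0 n 1).foldl (fun row j => row ++ [j + i * n]) [])]
    simp only [List.nil_append]
    apply List.map_congr_left
    intro i hi
    rw [foldl_append_singleton, List.nil_append]
    rw [carre_row n i]
    · exact ((PySem.List.mem_pyRange_one).1 hi).1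
    · exact ((PySem.List.mem_pyRange_one).1 hi).2
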